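-- pv_equiv track=rewrite | github.com/ooz34/codingtest-practice | 프로그래머스/2/138476. 귤 고르기/귤 고르기.py | solution
-- ===== SOURCE A (Python) =====
-- from collections import Counter
--
-- def solution(k, tangerine):
--     cnt = Counter(tangerine).most_common()
--     kinds = 0
--     packed = 0
--
--     for _, count in cnt:
--         packed += count
--         kinds += 1
--         if packed >= k:
--             break
--
--     return kinds
-- ===== SOURCE B (Python) =====
-- from collections import Counter
--
-- def solution(k, tangerine):
--     # Bucket-counting: group kinds by their frequency (Counter of counts) and walk
--     # frequency levels from the highest down, taking whole buckets; inside the final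
--     # bucket the number of kinds needed is a ceiling division -- no sorting at all.
--     buckets = Counter(Counter(tangerine).values())
--     if not buckets:
--         return 0
--     kinds = 0
--     remaining = k
--     for f in range(max(buckets), 0, -1):
--         c = buckets[f]
--         if c == 0:
--             continue
--         if remaining > f * c:
--             remaining -= f * c
--             kinds += c
--         else:
--             return kinds + max(1, (remaining + f - 1) // f)
--     return kinds
-- ===== Notes on version B (the rewrite author's own statement) =====
-- stated objective: alternative
-- what changed: Replaces A's sort of Counter.most_common() plus an accumulate-and-break loop by a sort-free bucket-counting algorithm: a Counter of the frequency values groups kinds by frequency, a descending walk over frequency levels consumes whole buckets, and the final partial bucket is resolved by a ceiling division instead of one-by-one accumulation.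
import Mathlib
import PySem

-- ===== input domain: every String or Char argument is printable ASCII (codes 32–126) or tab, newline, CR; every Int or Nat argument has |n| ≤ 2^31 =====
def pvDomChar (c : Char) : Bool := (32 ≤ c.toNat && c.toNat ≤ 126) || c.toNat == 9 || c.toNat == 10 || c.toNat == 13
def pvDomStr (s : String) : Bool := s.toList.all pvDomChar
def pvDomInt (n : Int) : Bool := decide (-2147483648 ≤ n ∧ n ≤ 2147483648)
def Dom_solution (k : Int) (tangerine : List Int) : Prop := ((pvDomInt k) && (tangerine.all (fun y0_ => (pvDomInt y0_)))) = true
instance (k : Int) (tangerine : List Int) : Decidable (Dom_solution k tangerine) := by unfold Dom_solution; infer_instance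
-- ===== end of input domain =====

-- B replaces A's sort + accumulate-and-break by sort-free bucket counting over
-- frequency levels with a final ceiling division (objective: alternative algorithm).

-- ===== PORT A =====
-- the 'for _, count in cnt: … if packed >= k: break' loop, step for step
def solutionLoop (k : Int) : List (Int × Int) → Int → Int → Int
  | [], _, kinds => kinds
  | (_, count) :: rest, packed, kinds =>
    let packed' := packed + count
    let kinds' := kinds + 1
    if packed' ≥ k then kinds' else solutionLoop k rest packed' kinds'

def solution (k : Int) (tangerine : List Int) : Int :=
  -- Counter(tangerine).most_common() = sorted(items, key=count, reverse=True) (CPython, stable)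
  let cnt := PySem.List.sorted (PySem.Dict.counter tangerine).items (fun p => p.2) true
  solutionLoop k cnt 0 0

-- ===== PORT B =====
-- the 'for f in range(max(buckets), 0, -1): …' loop of Source B: n is the current level f,
-- counting down to 1; an early 'return' is the non-recursive branch
def bucketLoop (buckets : PySem.Dict Int Int) : Nat → Int → Int → Int
  | 0, _, kinds => kinds
  | n + 1, remaining, kinds =>
    let f : Int := (n : Int) + 1
    let c := buckets.getD f 0
    if c = 0 then bucketLoop buckets n remaining kinds
    else if remaining > f * c then bucketLoop buckets n (remaining - f * c) (kinds + c)
    else kinds + max 1 (PySem.Int.floordiv (remaining + f - 1) f)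

def solution_alt (k : Int) (tangerine : List Int) : Int :=
  let buckets := PySem.Dict.counter (PySem.Dict.counter tangerine).values
  match PySem.List.max? buckets.keys (fun x => x) with
  | none => 0                                   -- 'if not buckets: return 0'
  | some m => bucketLoop buckets m.toNat k 0

-- ===== PRECONDITION & SPEC =====
def Spec_solution (k : Int) (tangerine : List Int) (out : Int) : Prop := out = solution_alt k tangerine
instance (k : Int) (tangerine : List Int) (out : Int) : Decidable (Spec_solution k tangerine out) := by unfold Spec_solution; infer_instance

-- ===== CLAIM (what is proved, stated in full; the proofs are below) =====
def Claim_equal_solution : Prop := ∀ (k : Int) (tangerine : List Int), Dom_solution k tangerine → Spec_solution k tangerine (solution k tangerine)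

-- ===== LEMMAS AND PROOFS =====

-- A's loop seen on the counts alone
def aLoop (k : Int) : List Int → Int → Int → Int
  | [], _, kinds => kinds
  | x :: rest, packed, kinds =>
    if packed + x ≥ k then kinds + 1 else aLoop k rest (packed + x) (kinds + 1)

lemma solutionLoop_eq_aLoop (k : Int) (cs : List (Int × Int)) (p ki : Int) :
    solutionLoop k cs p ki = aLoop k (cs.map (·.2)) p ki := by
  induction cs generalizing p ki with
  | nil => rfl
  | cons c t ih =>
    obtain ⟨v, count⟩ := c
    simp only [solutionLoop, List.map_cons, aLoop]
    split
    · rfl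
    · exact ih _ _

-- the descending multiset of counts listed level by level: level n, then n-1, … then 1
def descList (vals : List Int) : Nat → List Int
  | 0 => []
  | n + 1 => List.replicate (vals.count ((n : Int) + 1)) ((n : Int) + 1) ++ descList vals n

lemma mem_descList (vals : List Int) (n : Nat) (y : Int) (h : y ∈ descList vals n) :
    1 ≤ y ∧ y ≤ (n : Int) := by
  induction n with
  | zero => simp [descList] at h
  | succ m ih =>
    simp only [descList, List.mem_append, List.mem_replicate] at h
    rcases h with ⟨-, rfl⟩ | h
    · push_cast; omega
    · have := ih h; push_cast; omega

lemma descList_pairwise (vals : List Int) (n : Nat) :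
    (descList vals n).Pairwise (fun a b => b ≤ a) := by
  induction n with
  | zero => simp [descList]
  | succ m ih =>
    simp only [descList]
    rw [List.pairwise_append]
    refine ⟨?_, ih, ?_⟩
    · rw [List.pairwise_replicate]; right; exact le_refl _
    · intro a ha b hb
      rw [List.mem_replicate] at ha
      have := mem_descList vals m b hb
      omega

lemma count_descList (vals : List Int) (n : Nat) (x : Int) :
    (descList vals n).count x = if 1 ≤ x ∧ x ≤ (n : Int) then vals.count x else 0 := by
  induction n with
  | zero => simp only [descList, List.count_nil]; rw [if_neg (by push_cast; omega)]
  | succ m ih =>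
    simp only [descList, List.count_append, ih, List.count_replicate]
    by_cases hx : x = (m : Int) + 1
    · subst hx
      simp only [beq_self_eq_true, if_true]
      rw [if_neg (by omega), if_pos (by push_cast; omega)]
      omega
    · rw [if_neg (by simpa using Ne.symm hx)]
      by_cases h1 : 1 ≤ x ∧ x ≤ (m : Int)
      · rw [if_pos h1, if_pos (by push_cast; omega)]
        omega
      · rw [if_neg h1, if_neg (by push_cast; omega)]

lemma descList_perm (vals : List Int) (n : Nat)
    (hmem : ∀ v ∈ vals, 1 ≤ v ∧ v ≤ (n : Int)) :
    (descList vals n).Perm vals := by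
  rw [List.perm_iff_count]
  intro x
  rw [count_descList]
  by_cases hx : 1 ≤ x ∧ x ≤ (n : Int)
  · rw [if_pos hx]
  · rw [if_neg hx, eq_comm, List.count_eq_zero]
    intro hmem'
    exact hx (hmem x hmem')

-- A's loop over a constant block of c copies of f: break inside iff k - p ≤ f*c,
-- and then the number of steps taken is the ceiling max 1 ⌈(k-p)/f⌉
lemma aLoop_replicate (k f : Int) (hf : 1 ≤ f) (c : Nat) (hc : 1 ≤ c)
    (rest : List Int) (p ki : Int) :
    aLoop k (List.replicate c f ++ rest) p ki =
      if k - p ≤ f * (c : Int) then ki + max 1 (PySem.Int.floordiv (k - p + f - 1) f)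
      else aLoop k rest (p + f * (c : Int)) (ki + (c : Int)) := by
  induction c generalizing p ki with
  | zero => omega
  | succ c ih =>
    rw [List.replicate_succ, List.cons_append]
    simp only [aLoop]
    have hcast : ((c + 1 : Nat) : Int) = (c : Int) + 1 := by push_cast; ring
    rw [hcast, PySem.Int.floordiv_eq_ediv_of_pos (by omega)]
    by_cases hbr : p + f ≥ k
    · rw [if_pos hbr, if_pos ?hcond]
      case hcond =>
        have h1 : f * 1 ≤ f * ((c : Int) + 1) :=
          mul_le_mul_of_nonneg_left (by omega) (by omega)
        omega
      have hlt2 : (k - p + f - 1) / f < 2 := by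
        rw [Int.ediv_lt_iff_lt_mul (by omega)]
        omega
      omega
    · rw [if_neg hbr]
      by_cases hc0 : c = 0
      · subst hc0
        simp only [List.replicate_zero, List.nil_append]
        rw [if_neg (by push_cast at hbr ⊢; omega)]
        norm_num
      · rw [ih (by omega) (p + f) (ki + 1),
            PySem.Int.floordiv_eq_ediv_of_pos (by omega)]
        have hsplit : k - (p + f) ≤ f * (c : Int) ↔ k - p ≤ f * ((c : Int) + 1) := by
          constructor <;> intro h <;> nlinarith
        by_cases hin : k - (p + f) ≤ f * (c : Int)
        · rw [if_pos hin, if_pos (hsplit.mp hin)]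
          -- both ceilings are q' + 1 with q' = (k - p - 1) / f ≥ 1
          have he1 : k - (p + f) + f - 1 = k - p - 1 := by ring
          have he2 : k - p + f - 1 = (k - p - 1) + 1 * f := by ring
          rw [he1, he2, Int.add_mul_ediv_right _ _ (by omega : f ≠ 0)]
          have hq : 1 ≤ (k - p - 1) / f := by
            rw [Int.le_ediv_iff_mul_le (by omega)]
            omega
          omega
        · rw [if_neg hin, if_neg (fun h => hin (hsplit.mpr h))]
          have e1 : p + f + f * (c : Int) = p + f * ((c : Int) + 1) := by ring
          have e2 : ki + 1 + (c : Int) = ki + ((c : Int) + 1) := by ring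
          rw [e1, e2]

-- B's bucket loop computes A's loop over the level-by-level listing
lemma bucketLoop_eq_aLoop (k : Int) (vals : List Int) (n : Nat) (p ki : Int) :
    bucketLoop (PySem.Dict.counter vals) n (k - p) ki = aLoop k (descList vals n) p ki := by
  induction n generalizing p ki with
  | zero => rfl
  | succ m ih =>
    simp only [bucketLoop, descList, PySem.Dict.getD_counter]
    by_cases hc : (vals.count ((m : Int) + 1) : Int) = 0
    · rw [if_pos hc]
      have : vals.count ((m : Int) + 1) = 0 := by exact_mod_cast hc
      rw [this, List.replicate_zero, List.nil_append]
      exact ih p ki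
    · rw [if_neg hc]
      have hc1 : 1 ≤ vals.count ((m : Int) + 1) := by omega
      rw [aLoop_replicate k ((m : Int) + 1) (by omega) _ hc1]
      by_cases hgt : k - p > ((m : Int) + 1) * (vals.count ((m : Int) + 1) : Int)
      · rw [if_pos hgt, if_neg (by omega)]
        have e : k - p - ((m : Int) + 1) * (vals.count ((m : Int) + 1) : Int)
            = k - (p + ((m : Int) + 1) * (vals.count ((m : Int) + 1) : Int)) := by ring
        rw [e]
        exact ih _ _
      · rw [if_neg hgt, if_pos (by omega)]

-- every count stored by a Counter is at least 1
lemma counter_values_pos (xs : List Int) :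
    ∀ v ∈ (PySem.Dict.counter xs).values, 1 ≤ v := by
  intro v hv
  have : (PySem.Dict.counter xs).values
      = (PySem.Set.ofList xs).map (fun x => (xs.count x : Int)) := by
    simp [PySem.Dict.values, PySem.Dict.items_counter, List.map_map]
  rw [this] at hv
  obtain ⟨x, hx, rfl⟩ := List.mem_map.1 hv
  have : x ∈ xs := (PySem.Set.mem_ofList xs x).1 hx
  have := List.count_pos_iff.2 this
  exact_mod_cast this

-- the two descending count sequences A and B traverse are the same list
lemma map_snd_sorted_items (tangerine : List Int) :
    (PySem.List.sorted (PySem.Dict.counter tangerine).items (fun p => p.2) true).map (·.2)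
      = PySem.List.sorted (PySem.Dict.counter tangerine).values (fun x => x) true := by
  have hperm1 : ((PySem.List.sorted (PySem.Dict.counter tangerine).items (fun p => p.2) true).map (·.2)).Perm
      (PySem.Dict.counter tangerine).values := by
    have := PySem.List.sorted_perm (PySem.Dict.counter tangerine).items (fun p => p.2) true
    simpa [PySem.Dict.values] using this.map (·.2)
  have hperm2 : (PySem.List.sorted (PySem.Dict.counter tangerine).values (fun x => x) true).Perm
      (PySem.Dict.counter tangerine).values :=
    PySem.List.sorted_perm _ _ _
  have hp1 : ((PySem.List.sorted (PySem.Dict.counter tangerine).items (fun p => p.2) true).map (·.2)).Pairwise (fun a b => b ≤ a) := by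
    have := PySem.List.sorted_pairwise_rev (PySem.Dict.counter tangerine).items (fun p => p.2)
    exact List.Pairwise.map _ (fun a b h => h) this
  have hp2 : (PySem.List.sorted (PySem.Dict.counter tangerine).values (fun x => x) true).Pairwise (fun a b => b ≤ a) :=
    PySem.List.sorted_pairwise_rev _ _
  exact List.Perm.eq_of_pairwise (fun a b _ _ h1 h2 => le_antisymm h2 h1) hp1 hp2 (hperm1.trans hperm2.symm)

-- ===== VERDICT (by name: the statement is the Claim_ definition above) =====
theorem solution_spec : Claim_equal_solution := by
  intro k tangerine _
  unfold Spec_solution solution solution_alt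
  dsimp only
  rw [solutionLoop_eq_aLoop, map_snd_sorted_items]
  set vals := (PySem.Dict.counter tangerine).values with hvals
  have hpos : ∀ v ∈ vals, 1 ≤ v := counter_values_pos tangerine
  rw [PySem.Dict.keys_counter]
  cases hmax : PySem.List.max? (PySem.Set.ofList vals) (fun x => x) with
  | none =>
    have hset : PySem.Set.ofList vals = [] := (PySem.List.max?_eq_none_iff _ _).1 hmax
    have hnil : vals = [] := by
      cases hv : vals with
      | nil => rfl
      | cons a t =>
        exfalso
        have hm := (PySem.Set.mem_ofList vals a).2 (by rw [hv]; simp)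
        rw [hset] at hm
        simp at hm
    rw [hnil]
    simp [PySem.List.sorted, aLoop]
  | some m =>
    have hmm : m ∈ vals := (PySem.Set.mem_ofList vals m).1 (PySem.List.max?_mem hmax)
    have hml : 1 ≤ m := hpos m hmm
    have hmx : ∀ v ∈ vals, v ≤ m := fun v hv =>
      PySem.List.max?_isMax hmax v ((PySem.Set.mem_ofList vals v).2 hv)
    have hb := bucketLoop_eq_aLoop k vals m.toNat 0 0
    rw [sub_zero] at hb
    show aLoop k (PySem.List.sorted vals (fun x => x) true) 0 0
        = bucketLoop (PySem.Dict.counter vals) m.toNat k 0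
    rw [hb]
    congr 1
    exact (List.Perm.eq_of_pairwise (fun a b _ _ h1 h2 => le_antisymm h2 h1)
      (PySem.List.sorted_pairwise_rev vals (fun x => x)) (descList_pairwise vals m.toNat)
      ((PySem.List.sorted_perm vals (fun x => x) true).trans
        (descList_perm vals m.toNat (fun v hv => ⟨hpos v hv, by have := hmx v hv; omega⟩)).symm))
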